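-- pv_equiv track=rewrite | github.com/nkrameshkrishnan/aws-cost-dashboard | backend/app/api/v1/endpoints/performance.py | _get_query_recommendations
-- ===== SOURCE A (Python) =====
-- def _get_query_recommendations(queries: list) -> list:
--     """Generate database query optimization recommendations."""
--     recommendations = []
--
--     if not queries:
--         return [{
--             "priority": "info",
--             "category": "database",
--             "message": "No slow queries detected. Database performance is good."
--         }]
--
--     # Check for very slow queries (>5s)
--     very_slow = [q for q in queries if q["duration_ms"] > 5000]
--     if very_slow:
--         recommendations.append({
--             "priority": "high",
--             "category": "database",
--             "message": f"{len(very_slow)} queries taking >5 seconds. Add database indexes or optimize queries."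
--         })
--
--     # Check for moderately slow queries (1-5s)
--     slow = [q for q in queries if 1000 < q["duration_ms"] <= 5000]
--     if slow:
--         recommendations.append({
--             "priority": "medium",
--             "category": "database",
--             "message": f"{len(slow)} queries taking 1-5 seconds. Consider adding indexes."
--         })
--
--     return recommendations
-- ===== SOURCE B (Python) =====
-- def _get_query_recommendations(queries: list) -> list:
--     """Generate database query optimization recommendations (single-pass counting)."""
--     if not queries:
--         return [{
--             "priority": "info",
--             "category": "database",
--             "message": "No slow queries detected. Database performance is good."
--         }]
--
--     very_slow_count = 0
--     slow_count = 0
--     for q in queries: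
--         duration_ms = q["duration_ms"]
--         if duration_ms > 5000:
--             very_slow_count += 1
--         elif 1000 < duration_ms <= 5000:
--             slow_count += 1
--
--     recommendations = []
--     if very_slow_count > 0:
--         recommendations.append({
--             "priority": "high",
--             "category": "database",
--             "message": f"{very_slow_count} queries taking >5 seconds. Add database indexes or optimize queries."
--         })
--     if slow_count > 0:
--         recommendations.append({
--             "priority": "medium",
--             "category": "database",
--             "message": f"{slow_count} queries taking 1-5 seconds. Consider adding indexes."
--         })
--     return recommendations
-- ===== Notes on version B (the rewrite author's own statement) =====
-- stated objective: alternative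
-- what changed: Replaces the two intermediate filtered lists with one pass over queries maintaining two integer counters, building the recommendation list from the counts afterwards.
import Mathlib
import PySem

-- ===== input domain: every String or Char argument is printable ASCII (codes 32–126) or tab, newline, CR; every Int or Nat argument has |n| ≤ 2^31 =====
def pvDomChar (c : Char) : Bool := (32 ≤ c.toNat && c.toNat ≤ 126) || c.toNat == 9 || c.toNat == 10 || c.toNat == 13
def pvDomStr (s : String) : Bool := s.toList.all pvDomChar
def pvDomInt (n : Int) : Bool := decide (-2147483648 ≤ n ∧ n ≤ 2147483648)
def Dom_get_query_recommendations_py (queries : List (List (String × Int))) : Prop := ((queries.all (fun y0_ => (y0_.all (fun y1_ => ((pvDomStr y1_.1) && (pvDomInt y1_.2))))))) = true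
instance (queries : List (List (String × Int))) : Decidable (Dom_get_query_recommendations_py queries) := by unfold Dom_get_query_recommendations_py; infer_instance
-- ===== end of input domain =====

-- B replaces A's two filtered intermediate lists with a single counting pass; return value only, no mutation.

-- ===== PORT A =====

-- q["duration_ms"]; exact under Pre_ (the key is present in every query dict)
def pvDur (q : List (String × Int)) : Int :=
  ((PySem.Dict.mk q).get? "duration_ms").getD 0

def pvInfoRec : List (String × String) :=
  [("priority", "info"), ("category", "database"),
   ("message", "No slow queries detected. Database performance is good.")]

def pvHighRec (n : Int) : List (String × String) :=
  [("priority", "high"), ("category", "database"),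
   ("message", PySem.Int.toStr n ++ " queries taking >5 seconds. Add database indexes or optimize queries.")]

def pvMedRec (n : Int) : List (String × String) :=
  [("priority", "medium"), ("category", "database"),
   ("message", PySem.Int.toStr n ++ " queries taking 1-5 seconds. Consider adding indexes.")]

def get_query_recommendations_py (queries : List (List (String × Int))) : List (List (String × String)) :=
  if queries = [] then [pvInfoRec]
  else
    let very_slow := queries.filter (fun q => pvDur q > 5000)
    let recommendations : List (List (String × String)) :=
      if very_slow ≠ [] then [pvHighRec (very_slow.length : Int)] else []
    let slow := queries.filter (fun q => 1000 < pvDur q ∧ pvDur q ≤ 5000)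
    recommendations ++ (if slow ≠ [] then [pvMedRec (slow.length : Int)] else [])

-- ===== PORT B =====

def get_query_recommendations_py_alt (queries : List (List (String × Int))) : List (List (String × String)) :=
  if queries = [] then [pvInfoRec]
  else
    let counts : Int × Int :=
      queries.foldl (fun c q =>
        let duration_ms := pvDur q
        if duration_ms > 5000 then (c.1 + 1, c.2)
        else if 1000 < duration_ms ∧ duration_ms ≤ 5000 then (c.1, c.2 + 1)
        else c) (0, 0)
    (if counts.1 > 0 then [pvHighRec counts.1] else []) ++
    (if counts.2 > 0 then [pvMedRec counts.2] else [])

-- ===== PRECONDITION & SPEC =====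
-- Pre_: every query dict contains the key "duration_ms" (A raises KeyError otherwise, and so does B).
def Pre_get_query_recommendations_py (queries : List (List (String × Int))) : Prop :=
  ∀ q ∈ queries, (PySem.Dict.mk q).contains "duration_ms" = true
instance (queries : List (List (String × Int))) : Decidable (Pre_get_query_recommendations_py queries) := by unfold Pre_get_query_recommendations_py; infer_instance

def pvWitness_get_query_recommendations_py : (List (List (String × Int))) :=
  [[("duration_ms", 6000)], [("duration_ms", 2000)]]

def Spec_get_query_recommendations_py (queries : List (List (String × Int))) (out : List (List (String × String))) : Prop := out = get_query_recommendations_py_alt queries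
instance (queries : List (List (String × Int))) (out : List (List (String × String))) : Decidable (Spec_get_query_recommendations_py queries out) := by unfold Spec_get_query_recommendations_py; infer_instance

-- ===== CLAIM (what is proved, stated in full; the proofs are below) =====
def Claim_equal_get_query_recommendations_py : Prop := ∀ (queries : List (List (String × Int))), Dom_get_query_recommendations_py queries → Pre_get_query_recommendations_py queries → Spec_get_query_recommendations_py queries (get_query_recommendations_py queries)

-- ===== LEMMAS AND PROOFS =====

-- B's counting fold computes the lengths of A's two filtered lists.
lemma pv_fold_counts (queries : List (List (String × Int))) (a b : Int) :
    queries.foldl (fun c q =>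
        let duration_ms := pvDur q
        if duration_ms > 5000 then (c.1 + 1, c.2)
        else if 1000 < duration_ms ∧ duration_ms ≤ 5000 then (c.1, c.2 + 1)
        else c) (a, b)
    = (a + ((queries.filter (fun q => pvDur q > 5000)).length : Int),
       b + ((queries.filter (fun q => 1000 < pvDur q ∧ pvDur q ≤ 5000)).length : Int)) := by
  induction queries generalizing a b with
  | nil => simp
  | cons q qs ih =>
    simp only [List.foldl_cons, List.filter_cons]
    by_cases h1 : pvDur q > 5000
    · have h2 : ¬ (1000 < pvDur q ∧ pvDur q ≤ 5000) := by omega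
      simp [h1, h2, ih]; omega
    · by_cases h2 : 1000 < pvDur q ∧ pvDur q ≤ 5000
      · simp [h1, h2, ih]; omega
      · simp [h1, h2, ih]

-- ===== VERDICT (by name: the statement is the Claim_ definition above) =====
theorem get_query_recommendations_py_spec : Claim_equal_get_query_recommendations_py := by
  intro queries _ _
  unfold Spec_get_query_recommendations_py
  unfold get_query_recommendations_py get_query_recommendations_py_alt
  by_cases hq : queries = []
  · simp [hq]
  · simp only [hq, if_false, pv_fold_counts, zero_add]
    have hv : ((queries.filter (fun q => pvDur q > 5000)) ≠ []) ↔
        (0 : Int) < ((queries.filter (fun q => pvDur q > 5000)).length : Int) := by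
      rw [← List.length_pos_iff_ne_nil]; exact_mod_cast Iff.rfl
    have hs : ((queries.filter (fun q => 1000 < pvDur q ∧ pvDur q ≤ 5000)) ≠ []) ↔
        (0 : Int) < ((queries.filter (fun q => 1000 < pvDur q ∧ pvDur q ≤ 5000)).length : Int) := by
      rw [← List.length_pos_iff_ne_nil]; exact_mod_cast Iff.rfl
    by_cases h1 : (queries.filter (fun q => pvDur q > 5000)) ≠ [] <;>
      by_cases h2 : (queries.filter (fun q => 1000 < pvDur q ∧ pvDur q ≤ 5000)) ≠ [] <;>
        simp_all
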